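-- pv_equiv track=rewrite | github.com/pypi-data/pypi-mirror-390 | packages/innerloop/innerloop-0.0.0.dev12.tar.gz/innerloop-0.0.0.dev12/src/innerloop/output.py | _append_safely
-- ===== SOURCE A (Python) =====
-- def _append_safely(current: str, new: str) -> str:
--     """Append text handling both delta and snapshot streaming styles.
--
--     - Empty current: return new
--     - New starts with current: snapshot, return new (replace)
--     - Overlap at boundary: find longest suffix/prefix match, append remainder
--     - No overlap: delta, concatenate
--     """
--     if not current:
--         return new
--     if new.startswith(current):
--         return new
--
--     max_overlap = min(len(current), len(new))
--     for k in range(max_overlap, 0, -1):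
--         if current.endswith(new[:k]):
--             return current + new[k:]
--     return current + new
-- ===== SOURCE B (Python) =====
-- def _append_safely(current: str, new: str) -> str:
--     if not current:
--         return new
--     if new.startswith(current):
--         return new
--     # Single left-to-right pass over `current`, simulating the prefix-matching
--     # NFA of `new`: `active` holds every length j such that new[:j] is a suffix
--     # of the part of `current` scanned so far.  No substring comparisons: each
--     # step only compares single characters.  The final maximum is the longest
--     # suffix/prefix overlap at the boundary.
--     active = []
--     for c in current:
--         nxt = [j + 1 for j in active if j < len(new) and new[j] == c]
--         if new and new[0] == c:
--             nxt.append(1)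
--         active = nxt
--     k = max(active, default=0)
--     return current + new[k:]
-- ===== Notes on version B (the rewrite author's own statement) =====
-- stated objective: alternative
-- what changed: B replaces A's descending scan over overlap lengths with substring tests (current.endswith(new[:k])) by a single left-to-right pass over `current` simulating the prefix-matching NFA of `new`: it maintains the set of all lengths j with new[:j] a suffix of the scanned part, using only single-character comparisons, and takes the maximum at the end.
import Mathlib
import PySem

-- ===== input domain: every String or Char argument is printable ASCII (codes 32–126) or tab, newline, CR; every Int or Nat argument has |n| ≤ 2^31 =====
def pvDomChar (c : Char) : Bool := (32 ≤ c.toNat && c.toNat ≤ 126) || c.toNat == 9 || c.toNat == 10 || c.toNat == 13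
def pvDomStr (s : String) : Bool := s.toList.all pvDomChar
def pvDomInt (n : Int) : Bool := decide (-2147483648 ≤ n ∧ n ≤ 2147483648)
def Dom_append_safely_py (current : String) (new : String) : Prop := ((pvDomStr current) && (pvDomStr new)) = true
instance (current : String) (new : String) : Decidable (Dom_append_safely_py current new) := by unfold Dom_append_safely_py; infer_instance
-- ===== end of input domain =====

-- B replaces A's descending scan over overlap lengths (substring tests current.endswith(new[:k]))
-- by one left-to-right pass over `current` simulating the prefix-matching NFA of `new`
-- (set of active match lengths, single-character comparisons); same result, a different algorithm.

-- ===== PORT A =====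
-- 'for k in range(max_overlap, 0, -1): if current.endswith(new[:k]): return current + new[k:]'
def pvALoop (cur nw : List Char) : List Int → List Char
  | [] => cur ++ nw
  | k :: ks =>
      if PySem.Chars.endswith cur (PySem.List.slice nw none (some k)) then
        cur ++ PySem.List.slice nw (some k) none
      else pvALoop cur nw ks

def append_safely_py (current : String) (new : String) : String :=
  if current.toList = [] then new
  else if PySem.Chars.startswith new.toList current.toList then new
  else
    String.ofList (pvALoop current.toList new.toList
      (PySem.List.pyRange (min (current.toList.length : Int) (new.toList.length : Int)) 0 (-1)))

-- ===== PORT B =====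
-- loop body: 'nxt = [j+1 for j in active if j < len(new) and new[j] == c]; if new and new[0] == c: nxt.append(1)'
def pvBStep (nw : List Char) (active : List Nat) (c : Char) : List Nat :=
  let nxt := (active.filter
      (fun j => decide (j < nw.length) && (nw[j]? == some c))).map (fun j => j + 1)
  if (!nw.isEmpty) && (nw[0]? == some c) then nxt ++ [1] else nxt

def append_safely_py_alt (current : String) (new : String) : String :=
  if current.toList = [] then new
  else if PySem.Chars.startswith new.toList current.toList then new
  else
    let active := current.toList.foldl (pvBStep new.toList) []
    let k := active.foldl max 0          -- max(active, default=0)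
    String.ofList (current.toList ++ PySem.List.slice new.toList (some (k : Int)) none)

-- ===== PRECONDITION & SPEC =====
def Spec_append_safely_py (current : String) (new : String) (out : String) : Prop := out = append_safely_py_alt current new
instance (current : String) (new : String) (out : String) : Decidable (Spec_append_safely_py current new out) := by unfold Spec_append_safely_py; infer_instance

-- ===== CLAIM (what is proved, stated in full; the proofs are below) =====
def Claim_equal_append_safely_py : Prop := ∀ (current : String) (new : String), Dom_append_safely_py current new → Spec_append_safely_py current new (append_safely_py current new)

-- ===== LEMMAS AND PROOFS =====

-- "new[:j] is a suffix of t, as a real (nonempty, within-length) overlap"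
def pvOv (nw t : List Char) (j : Nat) : Prop := 1 ≤ j ∧ j ≤ nw.length ∧ nw.take j <:+ t

-- the value A's descending loop picks: greatest j ≤ m with take j nw a suffix of cur, else 0
def pvG (cur nw : List Char) : Nat → Nat
  | 0 => 0
  | (m+1) => if nw.take (m+1) <:+ cur then m + 1 else pvG cur nw m

theorem pv_concat_suffix_concat (A t : List Char) (x c : Char) :
    (A ++ [x] <:+ t ++ [c] ↔ A <:+ t ∧ x = c) := by
  constructor
  · rintro ⟨u, hu⟩
    rw [← List.append_assoc] at hu
    rcases List.append_inj' hu (by rfl) with ⟨hu1, hu2⟩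
    exact ⟨⟨u, hu1⟩, by injection hu2⟩
  · rintro ⟨⟨u, rfl⟩, rfl⟩
    exact ⟨u, by simp⟩

theorem pv_take_suffix_concat (nw t : List Char) (c : Char) (m : Nat) (hm : m < nw.length) :
    (nw.take (m+1) <:+ t ++ [c] ↔ nw.take m <:+ t ∧ nw[m]? = some c) := by
  have h1 : nw.take (m+1) = nw.take m ++ [nw[m]] := by
    rw [List.take_add_one, List.getElem?_eq_getElem hm]
    rfl
  rw [h1, pv_concat_suffix_concat, List.getElem?_eq_getElem hm]
  constructor
  · rintro ⟨h, rfl⟩; exact ⟨h, rfl⟩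
  · rintro ⟨h, hc⟩; exact ⟨h, Option.some.inj hc⟩

theorem pv_mem_step (nw : List Char) (a : List Nat) (c : Char) (j : Nat) :
    j ∈ pvBStep nw a c ↔
      ((∃ j' ∈ a, j' < nw.length ∧ nw[j']? = some c ∧ j = j' + 1) ∨
       (nw ≠ [] ∧ nw[0]? = some c ∧ j = 1)) := by
  unfold pvBStep
  split_ifs with h
  · simp only [Bool.and_eq_true, Bool.not_eq_true', List.isEmpty_eq_false_iff,
      beq_iff_eq] at h
    simp only [List.mem_append, List.mem_map, List.mem_filter, Bool.and_eq_true,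
      decide_eq_true_iff, beq_iff_eq, List.mem_singleton]
    constructor
    · rintro (⟨j', ⟨hj'a, hlt, hc⟩, rfl⟩ | rfl)
      · exact Or.inl ⟨j', hj'a, hlt, hc, rfl⟩
      · exact Or.inr ⟨h.1, h.2, rfl⟩
    · rintro (⟨j', hj'a, hlt, hc, rfl⟩ | ⟨_, _, rfl⟩)
      · exact Or.inl ⟨j', ⟨hj'a, hlt, hc⟩, rfl⟩
      · exact Or.inr rfl
  · simp only [Bool.and_eq_true, Bool.not_eq_true', List.isEmpty_eq_false_iff,
      beq_iff_eq, not_and] at h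
    simp only [List.mem_map, List.mem_filter, Bool.and_eq_true,
      decide_eq_true_iff, beq_iff_eq]
    constructor
    · rintro ⟨j', ⟨hj'a, hlt, hc⟩, rfl⟩
      exact Or.inl ⟨j', hj'a, hlt, hc, rfl⟩
    · rintro (⟨j', hj'a, hlt, hc, rfl⟩ | ⟨hne, hc, rfl⟩)
      · exact ⟨j', ⟨hj'a, hlt, hc⟩, rfl⟩
      · exact absurd hc (h hne)

theorem pv_inv (nw : List Char) (t : List Char) :
    ∀ j, j ∈ t.foldl (pvBStep nw) [] ↔ pvOv nw t j := by
  induction t using List.reverseRecOn with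
  | nil =>
      intro j
      simp only [List.foldl_nil, List.not_mem_nil, false_iff, pvOv]
      rintro ⟨h1, h2, h3⟩
      have h4 := List.eq_nil_of_suffix_nil h3
      have h5 : (nw.take j).length = 0 := by rw [h4]; rfl
      rw [List.length_take] at h5
      omega
  | append_singleton t c ih =>
      intro j
      rw [List.foldl_append, List.foldl_cons, List.foldl_nil, pv_mem_step]
      unfold pvOv
      constructor
      · rintro (⟨j', hj'a, hlt, hc, rfl⟩ | ⟨hne, hc, rfl⟩)
        · rcases (ih j').mp hj'a with ⟨h1, h2, h3⟩
          refine ⟨by omega, by omega, ?_⟩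
          rw [pv_take_suffix_concat nw t c j' hlt]
          exact ⟨h3, hc⟩
        · have hl : 0 < nw.length := List.length_pos_of_ne_nil hne
          refine ⟨le_refl 1, hl, ?_⟩
          rw [pv_take_suffix_concat nw t c 0 hl]
          exact ⟨by simp, hc⟩
      · rintro ⟨h1, h2, h3⟩
        obtain ⟨m, rfl⟩ : ∃ m, j = m + 1 := ⟨j - 1, by omega⟩
        have hm : m < nw.length := by omega
        rw [pv_take_suffix_concat nw t c m hm] at h3
        rcases h3 with ⟨hsuf, hc⟩
        by_cases hm0 : m = 0
        · subst hm0
          exact Or.inr ⟨List.ne_nil_of_length_pos hm, hc, rfl⟩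
        · refine Or.inl ⟨m, ?_, hm, hc, rfl⟩
          exact (ih m).mpr ⟨by omega, by omega, hsuf⟩

-- foldl max facts
theorem pv_foldl_max_le (l : List Nat) (a : Nat) : ∀ x ∈ l, x ≤ l.foldl max a := by
  induction l generalizing a with
  | nil => simp
  | cons y ys ih =>
      intro x hx
      rcases hx with _ | hx
      · calc y ≤ max a y := le_max_right _ _
          _ ≤ ys.foldl max (max a y) := pv_le_foldl ys (max a y)
      · exact ih (max a y) x (by assumption)
where
  pv_le_foldl (l : List Nat) (a : Nat) : a ≤ l.foldl max a := by
    induction l generalizing a with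
    | nil => simp
    | cons y ys ih => exact le_trans (le_max_left a y) (ih (max a y))

theorem pv_foldl_max_mem (l : List Nat) (a : Nat) : l.foldl max a = a ∨ l.foldl max a ∈ l := by
  induction l generalizing a with
  | nil => exact Or.inl rfl
  | cons y ys ih =>
      simp only [List.foldl_cons]
      rcases ih (max a y) with h | h
      · rcases max_choice a y with hm | hm
        · exact Or.inl (by rw [h, hm])
        · exact Or.inr (by rw [h, hm]; exact List.mem_cons_self)
      · exact Or.inr (List.mem_cons_of_mem _ h)

-- pvG facts
theorem pv_g_spec (cur nw : List Char) (m : Nat) :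
    pvG cur nw m = 0 ∨ (1 ≤ pvG cur nw m ∧ pvG cur nw m ≤ m ∧ nw.take (pvG cur nw m) <:+ cur) := by
  induction m with
  | zero => exact Or.inl rfl
  | succ n ih =>
      unfold pvG
      split_ifs with h
      · exact Or.inr ⟨by omega, le_refl _, h⟩
      · rcases ih with h0 | ⟨h1, h2, h3⟩
        · exact Or.inl h0
        · exact Or.inr ⟨h1, by omega, h3⟩

theorem pv_g_ge (cur nw : List Char) (m j : Nat) (hj1 : 1 ≤ j) (hjm : j ≤ m)
    (hsuf : nw.take j <:+ cur) : j ≤ pvG cur nw m := by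
  induction m with
  | zero => omega
  | succ n ih =>
      unfold pvG
      split_ifs with h
      · exact hjm
      · rcases Nat.lt_or_ge j (n+1) with hlt | hge
        · exact ih (by omega)
        · have hje : j = n + 1 := by omega
          rw [hje] at hsuf
          exact absurd hsuf h

-- A's loop computes cur ++ drop (pvG cur nw m) nw
theorem pv_aloop_eq (cur nw : List Char) (m : Nat) :
    pvALoop cur nw (PySem.List.pyRange (m : Int) 0 (-1)) = cur ++ nw.drop (pvG cur nw m) := by
  induction m with
  | zero =>
      rw [PySem.List.pyRange_neg_one_eq_nil (by norm_num)]
      rfl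
  | succ n ih =>
      rw [PySem.List.pyRange_neg_one_cons (by exact_mod_cast Nat.succ_pos n)]
      have harith : ((n+1 : Nat) : Int) - 1 = (n : Nat) := by push_cast; ring
      rw [harith]
      simp only [pvALoop]
      rw [PySem.List.slice_to_natCast, PySem.List.slice_from_natCast]
      have hA : PySem.Chars.endswith cur (nw.take (n+1)) = decide (nw.take (n+1) <:+ cur) := by
        rw [Bool.eq_iff_iff, PySem.Chars.endswith_iff, decide_eq_true_iff]
      rw [hA]
      unfold pvG
      by_cases h : nw.take (n+1) <:+ cur
      · simp [h]
      · simp [h, ih]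

-- the two selected overlap lengths agree
theorem pv_k_eq (cur nw : List Char) :
    pvG cur nw (min cur.length nw.length) = (cur.foldl (pvBStep nw) []).foldl max 0 := by
  set st := cur.foldl (pvBStep nw) [] with hst
  set k := st.foldl max 0 with hk
  set m := min cur.length nw.length with hm
  have hinv := pv_inv nw cur
  by_cases hk0 : k = 0
  · -- no overlap at all
    have hempty : ∀ j, ¬ pvOv nw cur j := by
      intro j hj
      have hjst : j ∈ st := (hinv j).mpr hj
      have := pv_foldl_max_le st 0 j hjst
      have h1 := hj.1
      omega
    rcases pv_g_spec cur nw m with h0 | ⟨h1, h2, h3⟩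
    · rw [h0, hk0]
    · exact absurd ⟨h1, by omega, h3⟩ (hempty _)
  · -- k is a genuine overlap, and pvG picks the same maximum
    have hkmem : k ∈ st := by
      rcases pv_foldl_max_mem st 0 with h | h
      · exact absurd h hk0
      · exact h
    rcases (hinv k).mp hkmem with ⟨hk1, hk2, hk3⟩
    have hkcur : k ≤ cur.length := by
      have := List.IsSuffix.length_le hk3
      rw [List.length_take] at this
      omega
    have hkm : k ≤ m := by omega
    have hge : k ≤ pvG cur nw m := pv_g_ge cur nw m k hk1 hkm hk3
    have hle : pvG cur nw m ≤ k := by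
      rcases pv_g_spec cur nw m with h0 | ⟨h1, h2, h3⟩
      · omega
      · have : pvG cur nw m ∈ st := (hinv _).mpr ⟨h1, by omega, h3⟩
        exact pv_foldl_max_le st 0 _ this
    omega

theorem pv_main (current new : String) :
    append_safely_py current new = append_safely_py_alt current new := by
  unfold append_safely_py append_safely_py_alt
  by_cases h1 : current.toList = []
  · rw [if_pos h1, if_pos h1]
  · rw [if_neg h1, if_neg h1]
    by_cases h2 : PySem.Chars.startswith new.toList current.toList = true
    · rw [if_pos h2, if_pos h2]
    · rw [if_neg h2, if_neg h2]
      simp only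
      congr 1
      have hmin : min (current.toList.length : Int) (new.toList.length : Int)
          = ((min current.toList.length new.toList.length : Nat) : Int) := by
        push_cast; ring
      rw [hmin, pv_aloop_eq, PySem.List.slice_from_natCast,
        pv_k_eq current.toList new.toList]

-- ===== VERDICT (by name: the statement is the Claim_ definition above) =====
theorem append_safely_py_spec : Claim_equal_append_safely_py := by
  intro current new _
  exact pv_main current new
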